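-- pv_equiv track=rewrite | github.com/jto6/dictation | dictate-daemon.py | strip_trailing_punctuation
-- ===== SOURCE A (Python) =====
-- def strip_trailing_punctuation(text: str) -> str:
--     """Strip trailing sentence-ending punctuation for streaming mode.
--
--     This prevents periods/ellipsis from being inserted when pausing mid-dictation.
--     Keeps commas and other mid-sentence punctuation.
--     """
--     # Strip trailing whitespace first
--     text = text.rstrip()
--     # Remove sentence-ending punctuation
--     while text and text[-1] in '.!?':
--         text = text[:-1]
--     # Also handle ellipsis that might be separate
--     text = text.rstrip()
--     if text.endswith('...'):
--         text = text[:-3].rstrip()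
--     elif text.endswith('..'):
--         text = text[:-2].rstrip()
--     return text
-- ===== SOURCE B (Python) =====
-- def strip_trailing_punctuation(text: str) -> str:
--     """Strip trailing sentence-ending punctuation for streaming mode.
--
--     Backward index scan: instead of repeatedly building truncated strings
--     (rstrip / text[:-1] slicing), walk a single index i back over the tail
--     and cut the string once at the end.
--     """
--     def back(i, pred):
--         while i > 0 and pred(text[i - 1]):
--             i -= 1
--         return i
--
--     is_ws = str.isspace
--     is_punct = '.!?'.__contains__
--     i = back(len(text), is_ws)
--     i = back(i, is_punct)
--     i = back(i, is_ws)
--     # a separate ellipsis group exposed by the scan above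
--     if i >= 3 and text[i - 3:i] == '...':
--         i = back(i - 3, is_ws)
--     elif i >= 2 and text[i - 2:i] == '..':
--         i = back(i - 2, is_ws)
--     return text[:i]
-- ===== Notes on version B (the rewrite author's own statement) =====
-- stated objective: alternative
-- what changed: Replaces A's repeated string truncation (rstrip, a while loop rebuilding text[:-1], rstrip, endswith slices) with a backward index scan over the unchanged string: an integer index walks over trailing whitespace, the punctuation run, whitespace and a separated two- or three-dot ellipsis group, and the string is cut once at the end.
import Mathlib
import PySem

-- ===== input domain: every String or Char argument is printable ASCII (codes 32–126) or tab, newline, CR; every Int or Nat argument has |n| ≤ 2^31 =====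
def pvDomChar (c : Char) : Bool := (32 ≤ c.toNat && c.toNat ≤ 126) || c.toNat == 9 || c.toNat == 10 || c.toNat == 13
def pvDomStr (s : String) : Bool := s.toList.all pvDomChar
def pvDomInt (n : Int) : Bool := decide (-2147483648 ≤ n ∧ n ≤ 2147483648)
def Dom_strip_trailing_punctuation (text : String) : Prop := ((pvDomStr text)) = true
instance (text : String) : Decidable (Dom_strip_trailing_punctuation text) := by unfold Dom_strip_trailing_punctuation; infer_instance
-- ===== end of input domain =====

-- B replaces A's repeated string truncation (rstrip, text[:-1] slicing loop, rstrip)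
-- by a backward index scan over the unchanged string with one final cut.

-- ===== PORT A =====
-- `while text and text[-1] in '.!?': text = text[:-1]`.
-- `text and text[-1] in '.!?'` is `s.getLast?.any …` (getLast? is none exactly on the
-- empty string, and PySem.List.pyGet? s (-1) = s.getLast?); `text[:-1]` is dropLast (exact).
def pvALoop (s : List Char) : List Char :=
  if _h : (s.getLast?.any fun c => c == '.' || c == '!' || c == '?') = true then
    pvALoop s.dropLast
  else s
termination_by s.length
decreasing_by
  have hne : s ≠ [] := by intro hnil; subst hnil; simp at _h
  have : 0 < s.length := List.length_pos_iff.mpr hne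
  simp [List.length_dropLast]; omega

-- the ellipsis tail of A: `if text.endswith('...'): … elif text.endswith('..'): …`
def pvAFinish (t3 : List Char) : String :=
  if PySem.Chars.endswith t3 ['.', '.', '.'] then
    String.mk (PySem.Chars.rstrip (PySem.List.slice t3 none (some (-3))))
  else if PySem.Chars.endswith t3 ['.', '.'] then
    String.mk (PySem.Chars.rstrip (PySem.List.slice t3 none (some (-2))))
  else
    String.mk t3

def strip_trailing_punctuation (text : String) : String :=
  pvAFinish (PySem.Chars.rstrip (pvALoop (PySem.Chars.rstrip text.toList)))

-- ===== PORT B =====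
-- `back(i, pred)`: walk i down while the char before it satisfies pred (text[i-1] = t.getD (i-1) ' ').
def pvBack (t : List Char) (p : Char → Bool) : Nat → Nat
  | 0 => 0
  | (i + 1) => if p (t.getD i ' ') then pvBack t p i else i + 1

-- the ellipsis tail of B: `text[i-3:i] == '...'` under the guard i ≥ 3 is (t.drop (i-3)).take 3 = "...";
-- `text[:i]` is t.take i
def pvBFinish (t : List Char) (i3 : Nat) : String :=
  if 3 ≤ i3 ∧ (t.drop (i3 - 3)).take 3 = ['.', '.', '.'] then
    String.mk (t.take (pvBack t (fun c => PySem.Chars.isspace c) (i3 - 3)))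
  else if 2 ≤ i3 ∧ (t.drop (i3 - 2)).take 2 = ['.', '.'] then
    String.mk (t.take (pvBack t (fun c => PySem.Chars.isspace c) (i3 - 2)))
  else
    String.mk (t.take i3)

def strip_trailing_punctuation_alt (text : String) : String :=
  pvBFinish text.toList
    (pvBack text.toList (fun c => PySem.Chars.isspace c)
      (pvBack text.toList (fun c => c == '.' || c == '!' || c == '?')
        (pvBack text.toList (fun c => PySem.Chars.isspace c) text.toList.length)))

-- ===== PRECONDITION & SPEC =====
def Spec_strip_trailing_punctuation (text : String) (out : String) : Prop := out = strip_trailing_punctuation_alt text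
instance (text : String) (out : String) : Decidable (Spec_strip_trailing_punctuation text out) := by unfold Spec_strip_trailing_punctuation; infer_instance

-- ===== CLAIM (what is proved, stated in full; the proofs are below) =====
def Claim_equal_strip_trailing_punctuation : Prop := ∀ (text : String), Dom_strip_trailing_punctuation text → Spec_strip_trailing_punctuation text (strip_trailing_punctuation text)

-- ===== LEMMAS AND PROOFS =====

theorem pvBack_le (t : List Char) (p : Char → Bool) (i : Nat) : pvBack t p i ≤ i := by
  induction i with
  | zero => simp [pvBack]
  | succ i ih =>
    simp only [pvBack]
    split
    · omega
    · omega

theorem pvBack_take (t : List Char) (p : Char → Bool) (i : Nat) (hi : i ≤ t.length) :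
    t.take (pvBack t p i) = ((t.take i).reverse.dropWhile p).reverse := by
  induction i with
  | zero => simp [pvBack]
  | succ i ih =>
    have hlt : i < t.length := by omega
    have hget : t.getD i ' ' = t[i] := by
      simp [List.getD, List.getElem?_eq_getElem hlt]
    have htake : t.take (i + 1) = t.take i ++ [t[i]] := by
      rw [List.take_add_one, List.getElem?_eq_getElem hlt]; rfl
    rw [htake, List.reverse_append, List.reverse_singleton, List.singleton_append,
      List.dropWhile_cons]
    by_cases hp : p t[i] = true
    · rw [hp]
      simp only [pvBack, hget, hp, if_true]
      exact ih (by omega)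
    · rw [Bool.not_eq_true] at hp
      rw [hp]
      simp only [pvBack, hget, hp, Bool.false_eq_true, if_false]
      rw [List.reverse_cons, List.reverse_reverse, htake]

theorem pvALoop_eq (s : List Char) :
    pvALoop s = (s.reverse.dropWhile (fun c => c == '.' || c == '!' || c == '?')).reverse := by
  induction s using List.reverseRecOn with
  | nil => simp [pvALoop]
  | append_singleton l a ih =>
    have hc : ((l ++ [a]).getLast?.any fun c => c == '.' || c == '!' || c == '?') =
        (a == '.' || a == '!' || a == '?') := by
      rw [List.getLast?_concat]; rfl
    rw [pvALoop]
    by_cases hp : (a == '.' || a == '!' || a == '?') = true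
    · rw [dif_pos (by rw [hc]; exact hp), List.dropLast_concat, ih, List.reverse_append,
        List.reverse_singleton, List.singleton_append, List.dropWhile_cons, hp, if_pos rfl]
    · rw [Bool.not_eq_true] at hp
      rw [dif_neg (by rw [hc, hp]; simp), List.reverse_append, List.reverse_singleton,
        List.singleton_append, List.dropWhile_cons, hp]
      simp

-- a suffix of t.take i, read as a window of t
theorem suffix_take_iff (t P : List Char) (i : Nat) (hi : i ≤ t.length) :
    P <:+ t.take i ↔ (P.length ≤ i ∧ (t.drop (i - P.length)).take P.length = P) := by
  constructor
  · intro h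
    have hlen : P.length ≤ i := by
      have := h.length_le
      simpa [List.length_take, Nat.min_eq_left hi] using this
    refine ⟨hlen, ?_⟩
    have hdrop := List.suffix_iff_eq_drop.mp h
    have hlen' : (t.take i).length = i := by simp [List.length_take, Nat.min_eq_left hi]
    rw [hlen'] at hdrop
    rw [List.drop_take] at hdrop
    have : i - (i - P.length) = P.length := by omega
    rw [this] at hdrop
    exact hdrop.symm
  · rintro ⟨hlen, hwin⟩
    have : t.take i = t.take (i - P.length) ++ (t.drop (i - P.length)).take P.length := by
      rw [← List.take_add]
      congr 1
      omega
    rw [this, hwin]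
    exact List.suffix_append _ _

-- slicing off a fixed-size tail: text[:-3] and text[:-2]
theorem slice_neg3 (t3 : List Char) :
    PySem.List.slice t3 none (some (-3)) = t3.take (t3.length - 3) := by
  simp [PySem.List.slice, PySem.List.clampIdx]
  split_ifs <;> omega

theorem slice_neg2 (t3 : List Char) :
    PySem.List.slice t3 none (some (-2)) = t3.take (t3.length - 2) := by
  simp [PySem.List.slice, PySem.List.clampIdx]
  split_ifs <;> omega

-- the three scans of B compute exactly A's rstrip / punctuation-loop / rstrip results
theorem take_pvBack_rstrip (t : List Char) (i : Nat) (hi : i ≤ t.length) :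
    t.take (pvBack t (fun c => PySem.Chars.isspace c) i) = PySem.Chars.rstrip (t.take i) := by
  rw [pvBack_take t _ i hi, PySem.Chars.rstrip]

theorem take_pvBack_aLoop (t : List Char) (i : Nat) (hi : i ≤ t.length) :
    t.take (pvBack t (fun c => c == '.' || c == '!' || c == '?') i) = pvALoop (t.take i) := by
  rw [pvBack_take t _ i hi, pvALoop_eq]

-- ===== VERDICT (by name: the statement is the Claim_ definition above) =====
-- the two ellipsis tails agree on t3 = t.take i3
theorem finish_eq (t : List Char) (i3 : Nat) (h3le : i3 ≤ t.length) :
    pvAFinish (t.take i3) = pvBFinish t i3 := by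
  have hlen3 : (t.take i3).length = i3 := by simp [Nat.min_eq_left h3le]
  unfold pvAFinish pvBFinish
  have hend3 : PySem.Chars.endswith (t.take i3) ['.', '.', '.'] = true ↔
      (3 ≤ i3 ∧ (t.drop (i3 - 3)).take 3 = ['.', '.', '.']) := by
    rw [PySem.Chars.endswith_iff]
    simpa using suffix_take_iff t ['.', '.', '.'] i3 h3le
  have hend2 : PySem.Chars.endswith (t.take i3) ['.', '.'] = true ↔
      (2 ≤ i3 ∧ (t.drop (i3 - 2)).take 2 = ['.', '.']) := by
    rw [PySem.Chars.endswith_iff]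
    simpa using suffix_take_iff t ['.', '.'] i3 h3le
  by_cases h3 : 3 ≤ i3 ∧ (t.drop (i3 - 3)).take 3 = ['.', '.', '.']
  · rw [if_pos (hend3.mpr h3), if_pos h3, slice_neg3, hlen3, List.take_take]
    have hmin : min (i3 - 3) i3 = i3 - 3 := by omega
    rw [hmin, take_pvBack_rstrip t (i3 - 3) (by omega)]
  · rw [if_neg (fun hc => h3 (hend3.mp hc)), if_neg h3]
    by_cases h2 : 2 ≤ i3 ∧ (t.drop (i3 - 2)).take 2 = ['.', '.']
    · rw [if_pos (hend2.mpr h2), if_pos h2, slice_neg2, hlen3, List.take_take]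
      have hmin : min (i3 - 2) i3 = i3 - 2 := by omega
      rw [hmin, take_pvBack_rstrip t (i3 - 2) (by omega)]
    · rw [if_neg (fun hc => h2 (hend2.mp hc)), if_neg h2]

-- ===== VERDICT (by name: the statement is the Claim_ definition above) =====
theorem strip_trailing_punctuation_spec : Claim_equal_strip_trailing_punctuation := by
  intro text _
  unfold Spec_strip_trailing_punctuation strip_trailing_punctuation strip_trailing_punctuation_alt
  set t := text.toList with ht
  set ws : Char → Bool := fun c => PySem.Chars.isspace c with hws
  set pu : Char → Bool := fun c => c == '.' || c == '!' || c == '?' with hpu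
  have h1le : pvBack t ws t.length ≤ t.length := pvBack_le _ _ _
  have h2le : pvBack t pu (pvBack t ws t.length) ≤ t.length := le_trans (pvBack_le _ _ _) h1le
  have h3le : pvBack t ws (pvBack t pu (pvBack t ws t.length)) ≤ t.length :=
    le_trans (pvBack_le _ _ _) h2le
  have e1 : PySem.Chars.rstrip t = t.take (pvBack t ws t.length) := by
    rw [take_pvBack_rstrip t t.length le_rfl, List.take_length]
  have e2 : pvALoop (PySem.Chars.rstrip t) = t.take (pvBack t pu (pvBack t ws t.length)) := by
    rw [take_pvBack_aLoop t _ h1le, e1]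
  have e3 : PySem.Chars.rstrip (pvALoop (PySem.Chars.rstrip t)) =
      t.take (pvBack t ws (pvBack t pu (pvBack t ws t.length))) := by
    rw [take_pvBack_rstrip t _ h2le, e2]
  rw [e3, finish_eq t _ h3le]
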